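-- pv_equiv track=rewrite | github.com/DeepBlueAI/AutoSmart | auto_smart/auto_smart/data_tools.py | gen_segs_tuple
-- ===== SOURCE A (Python) =====
-- def gen_segs_tuple(shape0,nseg):
--     segs = []
--     block_size = int(shape0/nseg)
--     i = -1
--     for i in range(nseg-1):
--         segs.append( (i*block_size,(i+1)*block_size) )
--     segs.append(((i+1)*block_size,shape0))
--     return segs
-- ===== SOURCE B (Python) =====
-- def gen_segs_tuple(shape0, nseg):
--     block_size = int(shape0 / nseg)
--     bounds = [i * block_size for i in range(nseg)] + [shape0]
--     return list(zip(bounds[:-1], bounds[1:]))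
-- ===== Notes on version B (the rewrite author's own statement) =====
-- stated objective: idiomatic
-- what changed: B builds a boundary list (the nseg start points followed by shape0) and pairs adjacent boundaries with zip, instead of a loop with a hand-written final append depending on a leftover loop variable.
-- outside the precondition, e.g. on gen_segs_tuple(5, 0): A raises ZeroDivisionError, B raises ZeroDivisionError; on gen_segs_tuple(5, -1): A returns [(0, 5)], B returns []
import Mathlib
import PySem

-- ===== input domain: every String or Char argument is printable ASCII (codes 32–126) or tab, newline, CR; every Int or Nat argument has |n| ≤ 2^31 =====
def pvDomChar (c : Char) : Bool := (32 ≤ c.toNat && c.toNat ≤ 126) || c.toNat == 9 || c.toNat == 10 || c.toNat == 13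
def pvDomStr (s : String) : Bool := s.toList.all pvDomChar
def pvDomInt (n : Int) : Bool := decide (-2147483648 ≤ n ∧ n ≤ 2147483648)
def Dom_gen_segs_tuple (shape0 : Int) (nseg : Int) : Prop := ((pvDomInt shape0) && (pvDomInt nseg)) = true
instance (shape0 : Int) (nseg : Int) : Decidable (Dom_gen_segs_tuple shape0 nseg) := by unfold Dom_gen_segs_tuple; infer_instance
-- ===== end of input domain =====

-- B replaces A's loop-plus-leftover-variable final append with a boundary list paired by zip (idiomatic, same cost).


-- ===== PORT A =====
-- int(shape0/nseg) is PySem.Int.truncdiv (exact here: |shape0|, |nseg| ≤ 2^31 < 2^53 on Dom)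
def gen_segs_tuple (shape0 : Int) (nseg : Int) : List (Int × Int) :=
  let block_size := PySem.Int.truncdiv shape0 nseg
  let st := (PySem.List.pyRange 0 (nseg - 1) 1).foldl
    (fun (st : List (Int × Int) × Int) i =>
      (st.1 ++ [(i * block_size, (i + 1) * block_size)], i)) ([], -1)
  st.1 ++ [((st.2 + 1) * block_size, shape0)]

-- ===== PORT B =====
def gen_segs_tuple_alt (shape0 : Int) (nseg : Int) : List (Int × Int) :=
  let block_size := PySem.Int.truncdiv shape0 nseg
  let bounds := ((PySem.List.pyRange 0 nseg 1).map (fun i => i * block_size)) ++ [shape0]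
  List.zip (PySem.List.slice bounds none (some (-1))) (PySem.List.slice bounds (some 1) none)

-- ===== PRECONDITION & SPEC =====
-- Pre_ excludes nseg = 0 (A raises ZeroDivisionError) and negative nseg, outside the natural
-- domain of a segment count, where A's [(0, shape0)] is an accident of its leftover loop variable.
def Pre_gen_segs_tuple (shape0 : Int) (nseg : Int) : Prop := 1 ≤ nseg
instance (shape0 : Int) (nseg : Int) : Decidable (Pre_gen_segs_tuple shape0 nseg) := by unfold Pre_gen_segs_tuple; infer_instance
def pvWitness_gen_segs_tuple : Int × Int := (10, 3)

def Spec_gen_segs_tuple (shape0 : Int) (nseg : Int) (out : List (Int × Int)) : Prop := out = gen_segs_tuple_alt shape0 nseg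
instance (shape0 : Int) (nseg : Int) (out : List (Int × Int)) : Decidable (Spec_gen_segs_tuple shape0 nseg out) := by unfold Spec_gen_segs_tuple; infer_instance

-- ===== CLAIM (what is proved, stated in full; the proofs are below) =====
def Claim_equal_gen_segs_tuple : Prop := ∀ (shape0 : Int) (nseg : Int), Dom_gen_segs_tuple shape0 nseg → Pre_gen_segs_tuple shape0 nseg → Spec_gen_segs_tuple shape0 nseg (gen_segs_tuple shape0 nseg)

-- ===== LEMMAS AND PROOFS =====

-- A's loop: after folding over range(n), segs holds the n blocks and i holds n-1.
theorem foldA (b : Int) (n : Nat) :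
    (PySem.List.pyRange 0 (n : Int) 1).foldl
      (fun (st : List (Int × Int) × Int) i =>
        (st.1 ++ [(i * b, (i + 1) * b)], i)) ([], -1)
    = ((List.range n).map (fun (k : Nat) => ((k : Int) * b, ((k : Int) + 1) * b)), (n : Int) - 1) := by
  induction n with
  | zero => simp [PySem.List.pyRange_one_eq_nil]
  | succ m ih =>
      rw [show ((m + 1 : Nat) : Int) = (m : Int) + 1 by push_cast; ring,
          PySem.List.pyRange_one_succ_right (by positivity), List.foldl_append, ih,
          List.range_succ, List.map_append]
      refine Prod.ext (by simp) (by simp)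

-- zip of dropLast against tail pairs the first two elements then recurses.
theorem zipAdj_cons {α : Type} (x y : α) (l : List α) :
    List.zip (x :: y :: l).dropLast (x :: y :: l).tail
    = (x, y) :: List.zip (y :: l).dropLast (y :: l).tail := by
  rw [List.dropLast_cons_of_ne_nil (by simp), List.tail_cons]
  cases l with
  | nil => rfl
  | cons z zs => rw [List.dropLast_cons_of_ne_nil (by simp)]; rfl

-- Pairing adjacent elements of (map f (range (n+1)) ++ [s0]) by zip of dropLast against tail.
theorem zipAdj (f : Nat → Int) (s0 : Int) (n : Nat) :
    List.zip (((List.range (n + 1)).map f ++ [s0]).dropLast) (((List.range (n + 1)).map f ++ [s0]).tail)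
    = (List.range n).map (fun k => (f k, f (k + 1))) ++ [(f n, s0)] := by
  induction n generalizing f with
  | zero => simp
  | succ m ih =>
      have hshape : (List.range (m + 2)).map f ++ [s0]
          = f 0 :: ((List.range (m + 1)).map (fun k => f (k + 1)) ++ [s0]) := by
        rw [List.range_succ_eq_map]
        simp [Function.comp]
      have hshape1 : (List.range (m + 1)).map (fun k => f (k + 1)) ++ [s0]
          = f 1 :: ((List.range m).map (fun k => f (k + 2)) ++ [s0]) := by
        rw [List.range_succ_eq_map]
        simp [Function.comp]
      rw [hshape, hshape1, zipAdj_cons, ← hshape1, ih (fun k => f (k + 1))]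
      simp [List.range_succ_eq_map, Function.comp]

-- ===== VERDICT (by name: the statement is the Claim_ definition above) =====
theorem gen_segs_tuple_spec : Claim_equal_gen_segs_tuple := by
  intro shape0 nseg _ hpre
  unfold Pre_gen_segs_tuple at hpre
  obtain ⟨m, hm⟩ : ∃ m : Nat, nseg = (m : Int) + 1 := ⟨(nseg - 1).toNat, by omega⟩
  subst hm
  unfold Spec_gen_segs_tuple
  simp only [gen_segs_tuple, gen_segs_tuple_alt]
  set b := PySem.Int.truncdiv shape0 ((m : Int) + 1) with hb
  rw [show (m : Int) + 1 - 1 = (m : Int) by ring, foldA b m]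
  have hrange : PySem.List.pyRange 0 ((m : Int) + 1) 1
      = (List.range (m + 1)).map (fun (k : Nat) => (k : Int)) := by
    rw [PySem.List.pyRange_one, show (((m : Int) + 1) - 0).toNat = m + 1 by omega]
    simp
  rw [hrange, List.map_map, PySem.List.slice_to_neg_one, PySem.List.slice_from_one,
      show ((fun i => i * b) ∘ fun (k : Nat) => (k : Int)) = (fun (k : Nat) => (k : Int) * b) from rfl,
      zipAdj (fun (k : Nat) => (k : Int) * b) shape0 m]
  refine congrArg₂ _ (List.map_congr_left fun k _ => ?_) (by norm_num)
  push_cast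
  ring_nf
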